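-- pv_equiv track=rewrite | github.com/indestinee/webtools | web_utils.py | get_path_tree
-- ===== SOURCE A (Python) =====
-- def get_path_tree(path):
--     sub_path = path.split('/')
--     path_tree = []
--     prefix = ''
--     if path != '':
--         for each in sub_path:
--             prefix = '/'.join([prefix, each])
--             path_tree.append([each, prefix])
--     return path_tree
-- ===== SOURCE B (Python) =====
-- def get_path_tree(path):
--     if path == '':
--         return []
--     parts = path.split('/')
--     prefixes = ['/'.join([''] + parts[:i + 1]) for i in range(len(parts))]
--     return [[seg, pre] for seg, pre in zip(parts, prefixes)]
-- ===== Notes on version B (the rewrite author's own statement) =====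
-- stated objective: alternative
-- what changed: Replaces A's single interleaved accumulate-and-append loop with a two-phase build: first a table of cumulative prefixes computed from slices of the split segments, then a zip pairing each segment with its prefix.
import Mathlib
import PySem

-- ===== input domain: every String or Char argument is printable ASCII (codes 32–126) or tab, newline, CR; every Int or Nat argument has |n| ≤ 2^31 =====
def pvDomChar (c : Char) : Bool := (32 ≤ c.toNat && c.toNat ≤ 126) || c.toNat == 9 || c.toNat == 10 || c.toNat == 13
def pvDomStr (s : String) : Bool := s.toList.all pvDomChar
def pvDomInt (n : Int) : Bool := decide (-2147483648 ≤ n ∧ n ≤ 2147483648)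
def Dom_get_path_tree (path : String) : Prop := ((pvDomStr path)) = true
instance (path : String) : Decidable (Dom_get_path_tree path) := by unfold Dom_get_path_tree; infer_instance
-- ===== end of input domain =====

-- B replaces A's single interleaved accumulate-and-append loop by a two-phase build:
-- first the table of cumulative prefixes from slices, then pairing segments with them (objective: alternative decomposition).

-- ===== PORT A =====
def get_path_tree (path : String) : List (List String) :=
  -- split('/'): the separator is the nonempty literal "/", so split? is always `some`
  let sub_path := (PySem.Str.split? path "/").getD []
  let st :=
    if path ≠ "" then
      sub_path.foldl (fun (st : List (List String) × String) each =>
        let pfx := PySem.Str.join "/" [st.2, each]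
        (st.1 ++ [[each, pfx]], pfx)) ([], "")
    else ([], "")
  st.1

-- ===== PORT B =====
def get_path_tree_alt (path : String) : List (List String) :=
  if path = "" then []
  else
    let parts := (PySem.Str.split? path "/").getD []
    let prefixes := (PySem.List.pyRange 0 parts.length 1).map
      (fun i => PySem.Str.join "/" ("" :: PySem.List.slice parts none (some (i + 1))))
    (parts.zip prefixes).map (fun p => [p.1, p.2])

-- ===== PRECONDITION & SPEC =====
def Spec_get_path_tree (path : String) (out : List (List String)) : Prop := out = get_path_tree_alt path
instance (path : String) (out : List (List String)) : Decidable (Spec_get_path_tree path out) := by unfold Spec_get_path_tree; infer_instance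

-- ===== CLAIM (what is proved, stated in full; the proofs are below) =====
def Claim_equal_get_path_tree : Prop := ∀ (path : String), Dom_get_path_tree path → Spec_get_path_tree path (get_path_tree path)

-- ===== LEMMAS AND PROOFS =====

-- the common specification: the list of [segment, cumulative prefix] pairs, threading the prefix
def pvBuild (pre : String) : List String → List (List String)
  | [] => []
  | e :: rest => [e, PySem.Str.join "/" [pre, e]] :: pvBuild (PySem.Str.join "/" [pre, e]) rest

theorem pv_join_shift (pre e : String) (l : List String) :
    PySem.Str.join "/" (pre :: e :: l) = PySem.Str.join "/" (PySem.Str.join "/" [pre, e] :: l) := by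
  apply String.toList_injective
  simp only [PySem.Str.toList_join, List.map_cons, List.map_nil]
  cases l with
  | nil =>
      simp [PySem.Chars.join_cons_cons, PySem.Chars.join_singleton]
  | cons q rest =>
      simp only [List.map_cons, PySem.Chars.join_cons_cons]
      simp [List.append_assoc]

theorem pv_foldA (parts : List String) : ∀ (acc : List (List String)) (pre : String),
    (parts.foldl (fun (st : List (List String) × String) each =>
        (st.1 ++ [[each, PySem.Str.join "/" [st.2, each]]], PySem.Str.join "/" [st.2, each]))
      (acc, pre)).1 = acc ++ pvBuild pre parts := by
  induction parts with
  | nil => intro acc pre; simp [pvBuild]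
  | cons e rest ih =>
      intro acc pre
      simp only [List.foldl_cons, pvBuild]
      rw [ih]
      simp

theorem pv_zipB (parts : List String) : ∀ (pre : String),
    (parts.zip ((List.range parts.length).map
        (fun i => PySem.Str.join "/" (pre :: parts.take (i + 1))))).map (fun p => [p.1, p.2])
      = pvBuild pre parts := by
  induction parts with
  | nil => intro pre; simp [pvBuild]
  | cons e rest ih =>
      intro pre
      simp only [List.length_cons]
      rw [List.range_succ_eq_map]
      simp only [List.map_cons, List.map_map, List.zip_cons_cons, List.take_succ_cons,
        List.take_zero, pvBuild]
      refine congrArg₂ _ rfl ?_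
      rw [← ih (PySem.Str.join "/" [pre, e])]
      congr 1
      congr 1
      apply List.map_congr_left
      intro i _
      simp only [Function.comp, Nat.succ_eq_add_one]
      rw [pv_join_shift]

theorem get_path_tree_eq (path : String) : get_path_tree path = get_path_tree_alt path := by
  unfold get_path_tree get_path_tree_alt
  by_cases h : path = ""
  · simp [h]
  · simp only [ne_eq, h, not_false_eq_true, if_true]
    rw [pv_foldA, List.nil_append, PySem.List.pyRange_one]
    rw [← pv_zipB ((PySem.Str.split? path "/").getD []) ""]
    congr 1
    congr 1
    simp only [Int.sub_zero, Int.toNat_natCast, List.map_map]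
    apply List.map_congr_left
    intro i _
    simp only [Function.comp_apply]
    have hc : (0 : Int) + (i : Int) + 1 = ((i + 1 : Nat) : Int) := by push_cast; ring
    rw [hc, PySem.List.slice_to_natCast]

-- ===== VERDICT (by name: the statement is the Claim_ definition above) =====
theorem get_path_tree_spec : Claim_equal_get_path_tree := by
  intro path _
  unfold Spec_get_path_tree
  exact get_path_tree_eq path
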